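-- pv_equiv track=rewrite | github.com/GabrielAlvarezM/Proyecto-Final-IA | models/train_models.py | filtrar_por_ciudad
-- ===== SOURCE A (Python) =====
-- def filtrar_por_ciudad(diccionario, ciudad):
--     filtrado = {col: [] for col in diccionario if col != 'Tipo_Hospedaje_Num'}
--     if 'Tipo_Hospedaje_Num' in diccionario:
--         filtrado['Tipo_Hospedaje_Num'] = []
--
--     for i, nombre_ciudad in enumerate(diccionario['Ciudad']):
--         if nombre_ciudad == ciudad:
--             for col in diccionario:
--                 filtrado[col].append(diccionario[col][i])
--     return filtrado
-- ===== SOURCE B (Python) =====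
-- def filtrar_por_ciudad(diccionario, ciudad):
--     # Row-major: transpose columns to row tuples, filter rows by city, re-split into columns.
--     claves = sorted(diccionario, key=lambda k: k == 'Tipo_Hospedaje_Num')  # stable: special key last
--     pos = claves.index('Ciudad')
--     filas = [fila for fila in zip(*(diccionario[k] for k in claves)) if fila[pos] == ciudad]
--     return {k: [fila[j] for fila in filas] for j, k in enumerate(claves)}
-- ===== Notes on version B (the rewrite author's own statement) =====
-- stated objective: alternative
-- what changed: Row-major instead of column-major: B transposes the columns into row tuples with zip, filters whole rows on the city field, and re-splits the kept rows into columns, versus A's per-index scan of the city column with per-column appends; the special key Tipo_Hospedaje_Num is moved last by a stable bool-keyed sort instead of A's rebuild-then-reinsert.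
import Mathlib
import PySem

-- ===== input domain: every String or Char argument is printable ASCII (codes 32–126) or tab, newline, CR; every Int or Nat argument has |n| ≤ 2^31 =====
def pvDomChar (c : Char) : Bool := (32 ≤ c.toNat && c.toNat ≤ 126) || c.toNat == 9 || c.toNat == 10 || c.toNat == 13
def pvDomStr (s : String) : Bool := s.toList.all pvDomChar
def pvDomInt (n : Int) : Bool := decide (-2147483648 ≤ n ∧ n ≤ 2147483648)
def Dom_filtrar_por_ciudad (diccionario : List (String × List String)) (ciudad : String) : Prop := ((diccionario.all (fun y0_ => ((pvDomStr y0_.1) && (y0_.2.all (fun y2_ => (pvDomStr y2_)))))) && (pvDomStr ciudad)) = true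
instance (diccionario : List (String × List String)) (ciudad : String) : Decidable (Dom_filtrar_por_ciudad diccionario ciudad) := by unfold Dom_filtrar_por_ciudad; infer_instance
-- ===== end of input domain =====

-- B works row-major (transpose via zip, filter whole rows by city, re-split into columns)
-- instead of A's column-major index scan with per-column appends; objective: alternative, same cost.

-- ===== PORT A =====
-- shared expression `diccionario[col][i]` (both Pythons read cells this way); the defaults
-- (missing key / out-of-range index) are exactly where Python raises — excluded by Pre_.
def pvCell (d : List (String × List String)) (k : String) (i : Int) : String :=
  (PySem.List.pyGet? ((List.lookup k d).getD []) i).getD ""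

-- `filtrado[col].append(v)`: mutate the (unique, by Pre_) entry of key `col` in place
def pvAppendAt (ac : List (String × List String)) (k : String) (v : String) :
    List (String × List String) :=
  ac.map (fun p => if p.1 = k then (p.1, p.2 ++ [v]) else p)

def filtrar_por_ciudad (diccionario : List (String × List String)) (ciudad : String) :
    List (String × List String) :=
  let filtrado : List (String × List String) :=
    (diccionario.filter (fun p => p.1 ≠ "Tipo_Hospedaje_Num")).map (fun p => (p.1, ([] : List String)))
  let filtrado :=
    if diccionario.any (fun p => p.1 = "Tipo_Hospedaje_Num") then
      filtrado ++ [("Tipo_Hospedaje_Num", ([] : List String))]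
    else filtrado
  (PySem.List.enumerate ((List.lookup "Ciudad" diccionario).getD []) 0).foldl
    (fun ac p =>
      if p.2 = ciudad then
        diccionario.foldl (fun ac2 q => pvAppendAt ac2 q.1 (pvCell diccionario q.1 p.1)) ac
      else ac)
    filtrado

-- ===== PORT B =====
-- sorted(diccionario, key=lambda k: k == 'Tipo_Hospedaje_Num'): a stable sort on a Bool key
-- is exactly the stable partition (False-keys first, then True-keys, each in original order)
def pvClaves (d : List (String × List String)) : List String :=
  (d.map Prod.fst).filter (fun k => k ≠ "Tipo_Hospedaje_Num") ++
  (d.map Prod.fst).filter (fun k => k = "Tipo_Hospedaje_Num")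

-- diccionario[k] (missing key = KeyError, outside Pre_)
def pvCol (d : List (String × List String)) (k : String) : List String :=
  (List.lookup k d).getD []

-- one tuple of zip(*(diccionario[k] for k in claves)): the i-th row (i < every column length
-- whenever used, so getD is exact)
def pvRow (d : List (String × List String)) (i : Nat) : List String :=
  (pvClaves d).map (fun k => (pvCol d k).getD i "")

-- zip truncates to the shortest column: number of rows produced
def pvNumRows (d : List (String × List String)) : Nat :=
  (((pvClaves d).map (fun k => (pvCol d k).length)).min?).getD 0

-- claves.index('Ciudad') (ValueError if missing = outside Pre_); row filter `fila[pos] == ciudad`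
def pvFilas (d : List (String × List String)) (ciudad : String) : List (List String) :=
  ((List.range (pvNumRows d)).map (pvRow d)).filter
    (fun fila => fila.getD ((PySem.List.index? (pvClaves d) "Ciudad").getD 0) "" = ciudad)

def filtrar_por_ciudad_alt (diccionario : List (String × List String)) (ciudad : String) :
    List (String × List String) :=
  (PySem.List.enumerate (pvClaves diccionario) 0).map
    (fun p => (p.2, (pvFilas diccionario ciudad).map
      (fun fila => (PySem.List.pyGet? fila p.1).getD "")))

-- ===== PRECONDITION & SPEC =====
-- Pre_ excludes: (a) assoc lists with duplicate keys, which no Python dict can present to A;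
-- (b) inputs without a 'Ciudad' key (A raises KeyError); (c) inputs where some column is too
-- short for a matching row index (A raises IndexError).
def Pre_filtrar_por_ciudad (diccionario : List (String × List String)) (ciudad : String) : Prop :=
  (diccionario.map Prod.fst).Nodup ∧
  "Ciudad" ∈ diccionario.map Prod.fst ∧
  ∀ p ∈ diccionario, ∀ q ∈ ((List.lookup "Ciudad" diccionario).getD []).zipIdx,
    q.1 = ciudad → q.2 < p.2.length
instance (diccionario : List (String × List String)) (ciudad : String) : Decidable (Pre_filtrar_por_ciudad diccionario ciudad) := by unfold Pre_filtrar_por_ciudad; infer_instance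

def pvWitness_filtrar_por_ciudad : (List (String × List String)) × String :=
  ([("Ciudad", ["a", "b", "a"]), ("Precio", ["1", "2", "3"]), ("Tipo_Hospedaje_Num", ["0", "1", "0"])], "a")

def Spec_filtrar_por_ciudad (diccionario : List (String × List String)) (ciudad : String) (out : List (String × List String)) : Prop := out = filtrar_por_ciudad_alt diccionario ciudad
instance (diccionario : List (String × List String)) (ciudad : String) (out : List (String × List String)) : Decidable (Spec_filtrar_por_ciudad diccionario ciudad out) := by unfold Spec_filtrar_por_ciudad; infer_instance

-- ===== CLAIM (what is proved, stated in full; the proofs are below) =====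
def Claim_equal_filtrar_por_ciudad : Prop := ∀ (diccionario : List (String × List String)) (ciudad : String), Dom_filtrar_por_ciudad diccionario ciudad → Pre_filtrar_por_ciudad diccionario ciudad → Spec_filtrar_por_ciudad diccionario ciudad (filtrar_por_ciudad diccionario ciudad)

-- ===== LEMMAS AND PROOFS =====

-- k ∈ keys ↔ lookup succeeds, with the found pair a member of the list
theorem pv_lookup_mem (l : List (String × List String)) (k : String)
    (h : k ∈ l.map Prod.fst) : ∃ v, List.lookup k l = some v ∧ (k, v) ∈ l := by
  induction l with
  | nil => simp at h
  | cons p t ih =>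
      by_cases hk : k = p.1
      · exact ⟨p.2, by simp [List.lookup, hk], by subst hk; left⟩
      · have hmem : k ∈ t.map Prod.fst := by
          rcases List.mem_map.mp h with ⟨q, hq, rfl⟩
          rcases List.mem_cons.mp hq with rfl | hq'
          · exact absurd rfl hk
          · exact List.mem_map.mpr ⟨q, hq', rfl⟩
        rcases ih hmem with ⟨v, hv, hvm⟩
        have hbeq : (k == p.1) = false := beq_eq_false_iff_ne.mpr hk
        exact ⟨v, by simp [List.lookup, hbeq, hv], List.mem_cons_of_mem _ hvm⟩

-- in a nodup list, filtering for one value keeps exactly its (single) occurrence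
theorem pv_filter_eq_single (l : List String) (a : String) (hnd : l.Nodup) :
    l.filter (fun k => k = a) = if a ∈ l then [a] else [] := by
  induction l with
  | nil => simp
  | cons x t ih =>
      rcases List.nodup_cons.mp hnd with ⟨hx, hnt⟩
      by_cases hxa : x = a
      · subst hxa
        simp [hx, ih hnt]
      · simp [hxa, ih hnt, Ne.symm hxa]

-- A's key order equals B's stable-partition order (keys nodup)
theorem pv_keys_eq (d : List (String × List String)) (hnd : (d.map Prod.fst).Nodup) :
    (if d.any (fun p => p.1 = "Tipo_Hospedaje_Num") then
      (d.filter (fun p => p.1 ≠ "Tipo_Hospedaje_Num")).map Prod.fst ++ ["Tipo_Hospedaje_Num"]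
    else (d.filter (fun p => p.1 ≠ "Tipo_Hospedaje_Num")).map Prod.fst) = pvClaves d := by
  unfold pvClaves
  have h1 : (d.map Prod.fst).filter (fun k => k ≠ "Tipo_Hospedaje_Num")
      = (d.filter (fun p => p.1 ≠ "Tipo_Hospedaje_Num")).map Prod.fst := by
    rw [List.filter_map]; rfl
  by_cases hm : "Tipo_Hospedaje_Num" ∈ d.map Prod.fst
  · have hany : d.any (fun p => p.1 = "Tipo_Hospedaje_Num") = true := by
      rcases List.mem_map.mp hm with ⟨p, hp, hpe⟩
      exact List.any_eq_true.mpr ⟨p, hp, decide_eq_true hpe⟩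
    rw [if_pos hany, h1, pv_filter_eq_single _ _ hnd, if_pos hm]
  · have hany : ¬ (d.any (fun p => p.1 = "Tipo_Hospedaje_Num") = true) := by
      intro h
      rcases List.any_eq_true.mp h with ⟨p, hp, hpe⟩
      exact hm (List.mem_map.mpr ⟨p, hp, of_decide_eq_true hpe⟩)
    rw [if_neg hany, h1, pv_filter_eq_single _ _ hnd, if_neg hm, List.append_nil]

-- A's inner `for col in diccionario: filtrado[col].append(...)` appends once to every entry
-- of the state whose key occurs in `diccionario` (keys nodup: exactly one append per key).
theorem pv_inner_fold (f : String → String) :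
    ∀ (ds : List (String × List String)) (ac : List (String × List String)),
      (ds.map Prod.fst).Nodup →
      ds.foldl (fun ac2 q => pvAppendAt ac2 q.1 (f q.1)) ac
        = ac.map (fun p => if p.1 ∈ ds.map Prod.fst then (p.1, p.2 ++ [f p.1]) else p) := by
  intro ds
  induction ds with
  | nil => intro ac _; simp
  | cons q t ih =>
      intro ac hnd
      simp only [List.map_cons, List.nodup_cons] at hnd
      have hq : q.1 ∉ t.map Prod.fst := hnd.1
      simp only [List.foldl_cons]
      rw [ih _ hnd.2]
      unfold pvAppendAt
      rw [List.map_map]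
      apply List.map_congr_left
      intro p _
      by_cases h : p.1 = q.1
      · simp [Function.comp, h, hq]
      · simp only [Function.comp_apply]
        rw [if_neg h]
        by_cases hm : p.1 ∈ List.map Prod.fst t <;> simp [List.mem_cons, h, hm]

-- A's outer row loop, on a state of the shape `K.map (fun k => (k, g k))` with every key of K
-- a key of `d`, gathers exactly the matching indices column-major.
theorem pv_outer_fold (d : List (String × List String)) (ciudad : String) (K : List String)
    (hnd : (d.map Prod.fst).Nodup) (hsub : ∀ k ∈ K, k ∈ d.map Prod.fst) :
    ∀ (rows : List (Int × String)) (g : String → List String),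
      rows.foldl
        (fun ac p =>
          if p.2 = ciudad then
            d.foldl (fun ac2 q => pvAppendAt ac2 q.1 (pvCell d q.1 p.1)) ac
          else ac)
        (K.map (fun k => (k, g k)))
        = K.map (fun k => (k, g k ++
            (rows.filterMap (fun p => if p.2 = ciudad then some p.1 else none)).map
              (fun i => pvCell d k i))) := by
  intro rows
  induction rows with
  | nil => intro g; simp
  | cons r t ih =>
      intro g
      simp only [List.foldl_cons, List.filterMap_cons]
      by_cases hr : r.2 = ciudad
      · rw [if_pos hr, if_pos hr,
          pv_inner_fold (fun k => pvCell d k r.1) d _ hnd, List.map_map]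
        have hstate :
            (K.map ((fun p : String × List String =>
                if p.1 ∈ d.map Prod.fst then (p.1, p.2 ++ [pvCell d p.1 r.1]) else p) ∘
                (fun k => (k, g k))))
              = K.map (fun k => (k, (g k ++ [pvCell d k r.1]))) := by
          apply List.map_congr_left
          intro k hk
          simp [Function.comp, hsub k hk]
        rw [hstate, ih (fun k => g k ++ [pvCell d k r.1])]
        simp [List.append_assoc]
      · rw [if_neg hr, if_neg hr, ih g]

-- A computed in closed form: the matching indices of the city column, gathered per key of pvClaves
theorem pv_A_char (d : List (String × List String)) (ciudad : String)
    (hnd : (d.map Prod.fst).Nodup) :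
    filtrar_por_ciudad d ciudad
      = (pvClaves d).map (fun k => (k,
          ((PySem.List.enumerate ((List.lookup "Ciudad" d).getD []) 0).filterMap
            (fun p => if p.2 = ciudad then some p.1 else none)).map
            (fun i => pvCell d k i))) := by
  unfold filtrar_por_ciudad
  have hsub : ∀ k ∈ pvClaves d, k ∈ d.map Prod.fst := by
    intro k hk
    unfold pvClaves at hk
    rcases List.mem_append.mp hk with h | h <;> exact (List.mem_filter.mp h).1
  have hinit :
      (if d.any (fun p => p.1 = "Tipo_Hospedaje_Num") then
        (d.filter (fun p => p.1 ≠ "Tipo_Hospedaje_Num")).map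
            (fun p => (p.1, ([] : List String))) ++ [("Tipo_Hospedaje_Num", ([] : List String))]
      else (d.filter (fun p => p.1 ≠ "Tipo_Hospedaje_Num")).map
            (fun p => (p.1, ([] : List String))))
        = (pvClaves d).map (fun k => (k, ([] : List String))) := by
    rw [← pv_keys_eq d hnd]
    by_cases hany : d.any (fun p => p.1 = "Tipo_Hospedaje_Num") <;>
      simp [hany, List.map_map, Function.comp]
  simp only []
  rw [hinit, pv_outer_fold d ciudad (pvClaves d) hnd hsub _ (fun _ => ([] : List String))]
  simp

-- matching indices of enumerate(xs, s) = (shifted) matching positions of range(len(xs))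
theorem pv_match_idx (xs : List String) (c : String) :
    ∀ s : Nat, (PySem.List.enumerate xs (s : Int)).filterMap
        (fun p => if p.2 = c then some p.1 else none)
      = ((List.range xs.length).filter (fun i => xs.getD i "" = c)).map
          (fun i => ((s + i : Nat) : Int)) := by
  induction xs with
  | nil => intro s; simp [PySem.List.enumerate_nil]
  | cons x t ih =>
      intro s
      rw [PySem.List.enumerate_cons, List.filterMap_cons]
      have hcast : (s : Int) + 1 = ((s + 1 : Nat) : Int) := by push_cast; ring
      rw [hcast, ih (s + 1)]
      have hR : (List.range (x :: t).length).filter (fun i => decide ((x :: t).getD i "" = c))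
          = (if x = c then [0] else []) ++
            ((List.range t.length).filter (fun i => decide (t.getD i "" = c))).map Nat.succ := by
        rw [List.length_cons, List.range_succ_eq_map, List.filter_cons]
        have hcomp : ((List.range t.length).map Nat.succ).filter
              (fun i => decide ((x :: t).getD i "" = c))
            = ((List.range t.length).filter (fun i => decide (t.getD i "" = c))).map Nat.succ := by
          rw [List.filter_map]
          congr 1
        simp only [List.getD_eq_getElem?_getD] at hcomp
        by_cases hx : x = c
        · subst hx
          simp [hcomp]
        · simp [hx, hcomp]
      rw [hR, List.map_append, List.map_map]
      have hMeq : ((List.range t.length).filter (fun i => decide (t.getD i "" = c))).map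
            ((fun i => ((s + i : Nat) : Int)) ∘ Nat.succ)
          = ((List.range t.length).filter (fun i => decide (t.getD i "" = c))).map
            (fun i => ((s + 1 + i : Nat) : Int)) := by
        apply List.map_congr_left
        intro i _
        show ((s + Nat.succ i : Nat) : Int) = ((s + 1 + i : Nat) : Int)
        congr 1
        omega
      rw [hMeq]
      by_cases hx : x = c
      · simp [hx]
      · simp [hx]

-- a filter over range(len) whose hits all lie below n ≤ len is a filter over range(n)
theorem pv_filter_range (len n : Nat) (p : Nat → Bool) (hn : n ≤ len)
    (hp : ∀ i < len, p i → i < n) :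
    (List.range len).filter p = (List.range n).filter p := by
  have hlen : len = n + (len - n) := by omega
  rw [hlen, List.range_add, List.filter_append]
  have h2 : ((List.range (len - n)).map (n + ·)).filter p = [] := by
    rw [List.filter_eq_nil_iff]
    intro a ha
    rcases List.mem_map.mp ha with ⟨j, hj, rfl⟩
    have hjlt := List.mem_range.mp hj
    intro hpa
    have := hp (n + j) (by omega) hpa
    omega
  rw [h2, List.append_nil]

theorem filtrar_spec_aux (d : List (String × List String)) (ciudad : String)
    (hpre : Pre_filtrar_por_ciudad d ciudad) :
    filtrar_por_ciudad d ciudad = filtrar_por_ciudad_alt d ciudad := by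
  obtain ⟨hnd, hC, hbound⟩ := hpre
  -- "Ciudad" sits in pvClaves; its position pos
  have hCcl : "Ciudad" ∈ pvClaves d := by
    unfold pvClaves
    exact List.mem_append_left _ (List.mem_filter.mpr ⟨hC, by decide⟩)
  obtain ⟨pos, hposeq⟩ := Option.isSome_iff_exists.mp
    ((PySem.List.index?_isSome_iff (pvClaves d) "Ciudad").mpr hCcl)
  obtain ⟨hposlt, hposval, -⟩ := PySem.List.getElem_of_index?_eq_some hposeq
  -- abbreviations
  set colC := (List.lookup "Ciudad" d).getD [] with hcolC
  have hcolCeq : pvCol d "Ciudad" = colC := rfl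
  set n := pvNumRows d with hn
  -- n = the min column length, ≤ len colC, and every matching index < n
  have hLne : ((pvClaves d).map (fun k => (pvCol d k).length)) ≠ [] := by
    simp only [ne_eq, List.map_eq_nil_iff]
    intro h; rw [h] at hCcl; simp at hCcl
  have hmins : (((pvClaves d).map (fun k => (pvCol d k).length)).min?).isSome := by
    rw [Option.isSome_iff_ne_none, ne_eq, List.min?_eq_none_iff]; exact hLne
  obtain ⟨m, hm⟩ := Option.isSome_iff_exists.mp hmins
  have hnm : n = m := by rw [hn]; unfold pvNumRows; rw [hm]; rfl
  have hmmin := List.min?_eq_some_iff.mp hm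
  have hnle : n ≤ colC.length := by
    rw [hnm]
    exact hmmin.2 _ (List.mem_map.mpr ⟨"Ciudad", hCcl, by rw [hcolCeq]⟩)
  have hmatch : ∀ i < colC.length, (fun i => decide (colC.getD i "" = ciudad)) i → i < n := by
    intro i hilen hpi
    have hgi : colC[i] = ciudad := by
      have := of_decide_eq_true hpi
      rwa [List.getD_eq_getElem?_getD, List.getElem?_eq_getElem hilen, Option.getD_some] at this
    have hzi : (ciudad, i) ∈ colC.zipIdx := by
      rw [List.mem_zipIdx_iff_getElem?]
      simp [List.getElem?_eq_getElem hilen, hgi]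
    rcases List.mem_map.mp hmmin.1 with ⟨k, hkcl, hkeq⟩
    have hkkeys : k ∈ d.map Prod.fst := by
      unfold pvClaves at hkcl
      rcases List.mem_append.mp hkcl with h | h <;> exact (List.mem_filter.mp h).1
    rcases pv_lookup_mem d k hkkeys with ⟨v, hv, hvm⟩
    have hvlen : m = v.length := by rw [← hkeq]; unfold pvCol; rw [hv]; rfl
    have hlt : i < v.length := hbound (k, v) hvm (ciudad, i) hzi rfl
    omega
  -- the matching indices, as naturals below n
  set mIdx : List Nat := (List.range n).filter (fun i => decide (colC.getD i "" = ciudad))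
    with hmIdx
  -- the i-th row read at position pos is the i-th city entry
  have hrowpos : ∀ i : Nat, (pvRow d i).getD pos "" = colC.getD i "" := by
    intro i
    unfold pvRow
    rw [List.getD_eq_getElem?_getD, List.getElem?_map, List.getElem?_eq_getElem hposlt]
    simp [hposval, hcolCeq, List.getD_eq_getElem?_getD]
  -- A in closed form over mIdx
  have hA : filtrar_por_ciudad d ciudad
      = (pvClaves d).map (fun k => (k, mIdx.map (fun i => (pvCol d k).getD i ""))) := by
    rw [pv_A_char d ciudad hnd]
    apply List.map_congr_left
    intro k _
    have hmi := pv_match_idx colC ciudad 0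
    simp only [Nat.cast_zero, Nat.zero_add] at hmi
    rw [hmi, pv_filter_range colC.length n _ hnle hmatch, List.map_map]
    rw [Prod.mk.injEq]
    refine ⟨rfl, ?_⟩
    apply List.map_congr_left
    intro i _
    simp [Function.comp, pvCell, pvCol, PySem.List.pyGet?_natCast, List.getD_eq_getElem?_getD]
  -- B's rows are exactly the rows at the matching indices
  have hfilas : pvFilas d ciudad = mIdx.map (pvRow d) := by
    unfold pvFilas
    rw [hposeq, Option.getD_some, List.filter_map, hmIdx, ← hn]
    congr 1
    apply List.filter_congr
    intro i hi
    simp only [Function.comp_apply]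
    rw [hrowpos i]
  -- B in the same closed form
  have hB : filtrar_por_ciudad_alt d ciudad
      = (pvClaves d).map (fun k => (k, mIdx.map (fun i => (pvCol d k).getD i ""))) := by
    unfold filtrar_por_ciudad_alt
    rw [hfilas]
    apply List.ext_getElem
    · simp [PySem.List.length_enumerate]
    · intro j h1 h2
      have hj : j < (pvClaves d).length := by
        simpa [PySem.List.length_enumerate] using h1
      simp only [List.getElem_map, PySem.List.getElem_enumerate, List.map_map]
      rw [Prod.mk.injEq]
      refine ⟨rfl, ?_⟩
      apply List.map_congr_left
      intro i _
      simp only [Function.comp_apply]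
      have hz : (0 : Int) + (j : Int) = ((j : Nat) : Int) := by ring
      rw [hz, PySem.List.pyGet?_natCast]
      unfold pvRow
      rw [List.getElem?_map, List.getElem?_eq_getElem hj]
      simp
  rw [hA, hB]

-- ===== VERDICT (by name: the statement is the Claim_ definition above) =====
theorem filtrar_por_ciudad_spec : Claim_equal_filtrar_por_ciudad := by
  intro d ciudad _ hpre
  unfold Spec_filtrar_por_ciudad
  exact filtrar_spec_aux d ciudad hpre
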